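-- pv_equiv track=rewrite | github.com/banane54/hpc_pde_python | data.py | create_dim
-- ===== SOURCE A (Python) =====
-- def create_dim(size):
--     dividers = []
--     for i in range(size - 1 , 0, -1):
--         if (size%i == 0 and i != 1):
--             dividers.append(i)
--     if (dividers == []):
--         return [size, 1]
--     else:
--         divider = dividers[len(dividers) // 2]
--         return [size // divider, divider]
-- ===== SOURCE B (Python) =====
-- def create_dim(size):
--     if size <= 3:
--         return [size, 1]
--     small = []
--     large = []
--     d = 2
--     while d * d <= size:
--         if size % d == 0:
--             small.append(d)
--             q = size // d
--             if q != d: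
--                 large.append(q)
--         d += 1
--     dividers = large + small[::-1]
--     if not dividers:
--         return [size, 1]
--     divider = dividers[len(dividers) // 2]
--     return [size // divider, divider]
-- ===== Notes on version B (the rewrite author's own statement) =====
-- stated objective: faster
-- what changed: Instead of scanning every i from size-1 down to 1 for divisors, B enumerates divisors d only up to sqrt(size) and obtains the large divisors as the cofactors size//d, assembling the same descending divisor list.
import Mathlib
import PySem

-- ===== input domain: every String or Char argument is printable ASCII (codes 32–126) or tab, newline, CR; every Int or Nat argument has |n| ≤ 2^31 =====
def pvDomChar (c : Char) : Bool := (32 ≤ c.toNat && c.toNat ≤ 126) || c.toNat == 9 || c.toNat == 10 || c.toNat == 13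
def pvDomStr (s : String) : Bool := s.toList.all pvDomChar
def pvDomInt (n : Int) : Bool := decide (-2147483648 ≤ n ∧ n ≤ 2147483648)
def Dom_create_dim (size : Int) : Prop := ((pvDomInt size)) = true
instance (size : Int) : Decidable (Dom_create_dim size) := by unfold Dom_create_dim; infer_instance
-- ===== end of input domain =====

-- B replaces A's downward scan of every candidate below size by an enumeration of divisor/cofactor
-- pairs d, size//d with d*d ≤ size, assembling the same descending divisor list (objective: faster).

-- ===== PORT A =====
def create_dim (size : Int) : List Int :=
  let dividers := (PySem.List.pyRange (size - 1) 0 (-1)).foldl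
      (fun acc i => if PySem.Int.mod size i == 0 && i != 1 then acc ++ [i] else acc) []
  if dividers == [] then [size, 1]
  else
    -- the index len(dividers)//2 is always in range, so pyGetD is exact here
    let divider := PySem.List.pyGetD dividers (PySem.Int.floordiv (dividers.length : Int) 2) 0
    [PySem.Int.floordiv size divider, divider]

-- ===== PORT B =====
-- termination helper for the 'while d * d <= size' loop of Source B
theorem pv_int_le_sq (d : Int) : d ≤ d * d := by
  rcases le_or_gt d 0 with h | h
  · nlinarith [mul_self_nonneg d]
  · nlinarith

-- the 'while d * d <= size' loop of Source B, with its two accumulators small/large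
def bLoop (size d : Int) (small large : List Int) : List Int × List Int :=
  if h : d * d ≤ size then
    if PySem.Int.mod size d == 0 then
      let q := PySem.Int.floordiv size d
      bLoop size (d + 1) (small ++ [d]) (if q != d then large ++ [q] else large)
    else bLoop size (d + 1) small large
  else (small, large)
termination_by (size + 2 - d).toNat
decreasing_by
  all_goals
    have hds : d ≤ size := le_trans (pv_int_le_sq d) h
    omega

def create_dim_alt (size : Int) : List Int :=
  if size ≤ 3 then [size, 1]
  else
    let sl := bLoop size 2 [] []
    let dividers := sl.2 ++ sl.1.reverse
    if dividers == [] then [size, 1]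
    else
      let divider := PySem.List.pyGetD dividers (PySem.Int.floordiv (dividers.length : Int) 2) 0
      [PySem.Int.floordiv size divider, divider]

-- ===== PRECONDITION & SPEC =====
def Spec_create_dim (size : Int) (out : List Int) : Prop := out = create_dim_alt size
instance (size : Int) (out : List Int) : Decidable (Spec_create_dim size out) := by unfold Spec_create_dim; infer_instance

-- ===== CLAIM (what is proved, stated in full; the proofs are below) =====
def Claim_equal_create_dim : Prop := ∀ (size : Int), Dom_create_dim size → Spec_create_dim size (create_dim size)

-- ===== LEMMAS AND PROOFS =====

-- A's dividers list: the descending proper divisors of n in [2, n-1]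
def aList (n : Int) : List Int :=
  (PySem.List.pyRange (n - 1) 0 (-1)).filter (fun i => PySem.Int.mod n i == 0 && i != 1)

-- the ascending small-divisor list B's loop collects from d upward
def tList (n d : Int) : List Int :=
  (PySem.List.pyRange d (n + 1) 1).filter (fun x => decide (x * x ≤ n ∧ x ∣ n))

-- the descending cofactor list B's loop collects from d upward
def lList (n d : Int) : List Int :=
  ((tList n d).filter (fun x => decide (x * x ≠ n))).map (fun x => PySem.Int.floordiv n x)

theorem mem_aList (n x : Int) : x ∈ aList n ↔ 2 ≤ x ∧ x ≤ n - 1 ∧ x ∣ n := by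
  simp [aList, List.mem_filter, PySem.List.mem_pyRange_neg_one]
  constructor
  · rintro ⟨⟨h1, h2⟩, h3, h4⟩
    exact ⟨by omega, h2, (PySem.Int.mod_eq_zero_iff_dvd n x).mp h3⟩
  · rintro ⟨h1, h2, h3⟩
    exact ⟨⟨by omega, h2⟩, (PySem.Int.mod_eq_zero_iff_dvd n x).mpr h3, by omega⟩

theorem pairwise_aList (n : Int) : (aList n).Pairwise (· > ·) := by
  apply List.Pairwise.filter
  rw [PySem.List.pyRange_neg_one_eq_reverse, List.pairwise_reverse]
  exact (PySem.List.pairwise_lt_pyRange_one _ _).imp (fun h => h)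

theorem mem_tList (n d x : Int) (hd : 0 < d) : x ∈ tList n d ↔ d ≤ x ∧ x * x ≤ n ∧ x ∣ n := by
  simp only [tList, List.mem_filter, PySem.List.mem_pyRange_one, decide_eq_true_eq]
  constructor
  · rintro ⟨⟨h1, h2⟩, h3, h4⟩; exact ⟨h1, h3, h4⟩
  · rintro ⟨h1, h2, h3⟩
    refine ⟨⟨h1, by nlinarith⟩, h2, h3⟩

theorem pairwise_tList (n d : Int) : (tList n d).Pairwise (· < ·) :=
  (PySem.List.pairwise_lt_pyRange_one _ _).filter _

theorem tList_nil (n d : Int) (hd : 0 < d) (h : n < d * d) : tList n d = [] := by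
  unfold tList
  rw [List.filter_eq_nil_iff]
  intro x hx
  rw [PySem.List.mem_pyRange_one] at hx
  simp only [decide_eq_true_eq]
  intro hc
  exact absurd hc.1 (by nlinarith [hx.1])

theorem tList_cons (n d : Int) (hd : 0 < d) (hle : d * d ≤ n) (hdvd : d ∣ n) :
    tList n d = d :: tList n (d + 1) := by
  unfold tList
  rw [PySem.List.pyRange_one_cons (by nlinarith)]
  simp [hle, hdvd]

theorem tList_skip (n d : Int) (hd : 0 < d) (hle : d * d ≤ n) (hndvd : ¬ d ∣ n) :
    tList n d = tList n (d + 1) := by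
  unfold tList
  rw [PySem.List.pyRange_one_cons (by nlinarith)]
  simp [hndvd]

theorem bLoop_eq (n : Int) : ∀ (k : Nat) (d : Int), (n + 2 - d).toNat ≤ k → 0 < d →
    ∀ small large, bLoop n d small large = (small ++ tList n d, large ++ lList n d) := by
  intro k
  induction k with
  | zero =>
    intro d hk hd small large
    have h1 : n + 2 ≤ d := by omega
    have hgt : n < d * d := by linarith [pv_int_le_sq d]
    rw [bLoop]
    simp [not_le.mpr hgt, tList_nil n d hd hgt, lList]
  | succ k ih =>
    intro d hk hd small large
    rw [bLoop]
    by_cases hle : d * d ≤ n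
    · have hdn : d ≤ n := le_trans (pv_int_le_sq d) hle
      have hk' : (n + 2 - (d + 1)).toNat ≤ k := by omega
      by_cases hdvd : d ∣ n
      · have hmod : (PySem.Int.mod n d == 0) = true := by
          rw [beq_iff_eq, PySem.Int.mod_eq_zero_iff_dvd]; exact hdvd
        have hq : PySem.Int.floordiv n d = n / d := PySem.Int.floordiv_eq_ediv_of_pos hd
        have hmul : d * (n / d) = n := Int.mul_ediv_cancel' hdvd
        simp only [hle, dif_pos, hmod, if_pos]
        rw [ih (d+1) hk' (by omega)]
        rw [tList_cons n d hd hle hdvd]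
        by_cases hsq : d * d = n
        · have hqd : PySem.Int.floordiv n d = d := by
            rw [hq, ← hsq, Int.mul_ediv_cancel_left _ (by omega)]
          have hL : lList n d = lList n (d+1) := by
            unfold lList; rw [tList_cons n d hd hle hdvd]
            simp [hsq]
          simp only [hqd, bne_self_eq_false, Bool.false_eq_true, if_false, hL,
            List.append_assoc, List.singleton_append]
        · have hqd : PySem.Int.floordiv n d ≠ d := by
            rw [hq]; intro hc; rw [hc] at hmul; exact hsq hmul
          have hL : lList n d = PySem.Int.floordiv n d :: lList n (d+1) := by
            unfold lList; rw [tList_cons n d hd hle hdvd]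
            rw [List.filter_cons, if_pos (by simp only [decide_eq_true_eq]; intro hc; exact hsq hc)]
            simp
          simp only [bne_iff_ne, ne_eq, hqd, not_false_iff, if_pos, hL,
            List.append_assoc, List.singleton_append]
      · have hmod : (PySem.Int.mod n d == 0) = false := by
          rw [beq_eq_false_iff_ne]; intro hc
          exact hdvd ((PySem.Int.mod_eq_zero_iff_dvd n d).mp hc)
        have hL : lList n d = lList n (d+1) := by
          unfold lList; rw [tList_skip n d hd hle hdvd]
        simp only [hle, dif_pos, hmod, Bool.false_eq_true, if_false]
        rw [ih (d+1) hk' (by omega), tList_skip n d hd hle hdvd, hL]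
    · have hgt : n < d * d := by omega
      simp only [hle, dif_neg, not_false_iff]
      rw [tList_nil n d hd hgt]
      simp [lList, tList_nil n d hd hgt]

theorem mem_lList (n x : Int) : x ∈ lList n 2 ↔
    ∃ y, (2 ≤ y ∧ y * y ≤ n ∧ y ∣ n) ∧ y * y ≠ n ∧ x = PySem.Int.floordiv n y := by
  simp only [lList, List.mem_map, List.mem_filter, decide_eq_true_eq]
  constructor
  · rintro ⟨y, ⟨hy, hne⟩, hx⟩
    exact ⟨y, (mem_tList n 2 y (by omega)).mp hy, hne, hx.symm⟩
  · rintro ⟨y, hy, hne, hx⟩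
    exact ⟨y, ⟨(mem_tList n 2 y (by omega)).mpr hy, hne⟩, hx.symm⟩

theorem mem_bList (n x : Int) (hn : 4 ≤ n) :
    x ∈ lList n 2 ++ (tList n 2).reverse ↔ x ∈ aList n := by
  rw [List.mem_append, List.mem_reverse, mem_lList, mem_tList n 2 x (by omega), mem_aList]
  constructor
  · rintro (⟨y, ⟨h2y, hyy, hydvd⟩, hne, hx⟩ | ⟨h2x, hxx, hxdvd⟩)
    · have hy0 : (0:Int) < y := by omega
      have hmul : y * (n / y) = n := Int.mul_ediv_cancel' hydvd
      have hxq : x = n / y := by rw [hx, PySem.Int.floordiv_eq_ediv_of_pos hy0]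
      have hmul' : y * x = n := by rw [hxq]; exact hmul
      have hlt : y * y < n := lt_of_le_of_ne hyy hne
      have hygt : y < x := by nlinarith
      have hdvd : x ∣ n := ⟨y, by linarith [hmul']⟩
      refine ⟨by omega, by nlinarith, hdvd⟩
    · exact ⟨h2x, by nlinarith, hxdvd⟩
  · rintro ⟨h2x, hx1, hxdvd⟩
    by_cases hxx : x * x ≤ n
    · exact Or.inr ⟨h2x, hxx, hxdvd⟩
    · left
      have hx0 : (0:Int) < x := by omega
      have hmul : x * (n / x) = n := Int.mul_ediv_cancel' hxdvd
      set y := n / x with hy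
      have hy1 : 1 ≤ y := by nlinarith
      have hy2 : 2 ≤ y := by
        rcases lt_or_ge y 2 with h | h
        · have : y = 1 := by omega
          rw [this, mul_one] at hmul; omega
        · exact h
      have hyx : y < x := by nlinarith
      have hyyn : y * y < n := by nlinarith
      refine ⟨y, ⟨hy2, le_of_lt hyyn, ⟨x, by linarith⟩⟩, ne_of_lt hyyn, ?_⟩
      have : n = y * x := by linarith
      rw [PySem.Int.floordiv_eq_ediv_of_pos (by omega), this, Int.mul_ediv_cancel_left _ (by omega)]

theorem pairwise_bList (n : Int) (hn : 4 ≤ n) :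
    (lList n 2 ++ (tList n 2).reverse).Pairwise (· > ·) := by
  rw [List.pairwise_append]
  refine ⟨?_, ?_, ?_⟩
  · unfold lList
    rw [List.pairwise_map]
    refine ((pairwise_tList n 2).filter _).imp_of_mem ?_
    intro a b ha hb hab
    have ha' := (mem_tList n 2 a (by omega)).mp (List.mem_of_mem_filter ha)
    have hb' := (mem_tList n 2 b (by omega)).mp (List.mem_of_mem_filter hb)
    have hma : a * (n / a) = n := Int.mul_ediv_cancel' ha'.2.2
    have hmb : b * (n / b) = n := Int.mul_ediv_cancel' hb'.2.2
    rw [PySem.Int.floordiv_eq_ediv_of_pos (by omega), PySem.Int.floordiv_eq_ediv_of_pos (by omega)]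
    have hqb : 0 < n / b := by nlinarith
    by_contra h
    push Not at h
    nlinarith
  · rw [List.pairwise_reverse]
    exact (pairwise_tList n 2).imp (fun h => h)
  · intro a ha b hb
    rw [List.mem_reverse] at hb
    obtain ⟨y, ⟨h2y, hyy, hydvd⟩, hne, hx⟩ := (mem_lList n a).mp ha
    obtain ⟨h2b, hbb, _⟩ := (mem_tList n 2 b (by omega)).mp hb
    have hmul : y * (n / y) = n := Int.mul_ediv_cancel' hydvd
    have ha' : a = n / y := by rw [hx, PySem.Int.floordiv_eq_ediv_of_pos (by omega)]
    have hmul' : y * a = n := by rw [ha']; exact hmul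
    have hlt : y * y < n := lt_of_le_of_ne hyy hne
    have hya : y < a := by nlinarith
    by_contra h
    push Not at h
    nlinarith

theorem dividers_eq (n : Int) (hn : 4 ≤ n) :
    aList n = lList n 2 ++ (tList n 2).reverse := by
  refine (List.Perm.eq_of_pairwise (le := (· > ·))
    (fun a b _ _ h1 h2 => by omega) (pairwise_bList n hn) (pairwise_aList n) ?_).symm
  rw [List.perm_ext_iff_of_nodup ((pairwise_bList n hn).imp (fun h => ne_of_gt h))
    ((pairwise_aList n).imp (fun h => ne_of_gt h))]
  intro x
  exact mem_bList n x hn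

theorem aList_small (n : Int) (hn : n ≤ 3) : aList n = [] := by
  rcases lt_or_ge n 2 with h | h
  · unfold aList
    rw [PySem.List.pyRange_neg_one_eq_nil (by omega)]
    rfl
  · interval_cases n <;> decide

theorem main_eq (n : Int) : create_dim n = create_dim_alt n := by
  unfold create_dim create_dim_alt
  rw [PySem.List.foldl_append_if_eq_filter, List.nil_append]
  have hA : (PySem.List.pyRange (n - 1) 0 (-1)).filter
      (fun i => PySem.Int.mod n i == 0 && i != 1) = aList n := rfl
  rw [hA]
  by_cases hn : n ≤ 3
  · rw [if_pos hn, aList_small n hn]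
    rfl
  · have h4 : 4 ≤ n := by omega
    have hb := bLoop_eq n (n + 2 - 2).toNat 2 (le_refl _) (by omega) [] []
    simp only [List.nil_append] at hb
    rw [if_neg hn, hb]
    simp only []
    rw [← dividers_eq n h4]

-- ===== VERDICT (by name: the statement is the Claim_ definition above) =====
theorem create_dim_spec : Claim_equal_create_dim := by
  intro n _
  unfold Spec_create_dim
  exact main_eq n
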